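-- pv_equiv track=rewrite | github.com/Rivarrl/leetcode_python | extra/exam/bianlifeng/t2.py | f
-- ===== SOURCE A (Python) =====
-- matrix = [['0','1','C','H','A'],
--           ['9','E','7','B','I'],
--           ['K','D','4','8','J'],
--           ['6','5','F','G','O'],
--           ['L','N','M','2','3']]
--
-- def f(s):
--     dxy = ((0, 1), (1, 0), (0, -1), (-1, 0))
--     def dfs(i, j, k=1):
--         if k == len(s): return True
--         for dx, dy in dxy:
--             x, y = i + dx, j + dy
--             if 0 <= x < 5 and 0 <= y < 5 and not vis[x][y] and matrix[x][y] == s[k]: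
--                 vis[x][y] = True
--                 if dfs(x, y, k+1): return True
--                 vis[x][y] = False
--         return False
--
--     for i in range(5):
--         for j in range(5):
--             if matrix[i][j] == s[0]:
--                 vis = [[False]*5 for _ in range(5)]
--                 vis[i][j] = True
--                 if dfs(i, j): return 1
--     return 0
-- ===== SOURCE B (Python) =====
-- matrix = [['0','1','C','H','A'],
--           ['9','E','7','B','I'],
--           ['K','D','4','8','J'],
--           ['6','5','F','G','O'],
--           ['L','N','M','2','3']]
--
-- def f(s):
--     pos = {c: (i, j) for i, row in enumerate(matrix) for j, c in enumerate(row)}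
--     if s[0] not in pos:
--         return 0
--     seen = {s[0]}
--     for k in range(1, len(s)):
--         c = s[k]
--         if c not in pos or c in seen:
--             return 0
--         x1, y1 = pos[s[k - 1]]
--         x2, y2 = pos[c]
--         if abs(x1 - x2) + abs(y1 - y2) != 1:
--             return 0
--         seen.add(c)
--     return 1
-- ===== Notes on version B (the rewrite author's own statement) =====
-- stated objective: simpler
-- what changed: Replaces the recursive backtracking DFS over the 5x5 grid (with a mutable visited matrix and a 25-cell scan for the start) by a char->(row,col) dictionary built once, followed by a single linear pass that checks each consecutive pair for Manhattan distance 1 and rejects revisited characters (grid characters are distinct, so the walk is deterministic).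
-- outside the precondition, e.g. on f(''): A raises IndexError, B raises IndexError
import Mathlib
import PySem

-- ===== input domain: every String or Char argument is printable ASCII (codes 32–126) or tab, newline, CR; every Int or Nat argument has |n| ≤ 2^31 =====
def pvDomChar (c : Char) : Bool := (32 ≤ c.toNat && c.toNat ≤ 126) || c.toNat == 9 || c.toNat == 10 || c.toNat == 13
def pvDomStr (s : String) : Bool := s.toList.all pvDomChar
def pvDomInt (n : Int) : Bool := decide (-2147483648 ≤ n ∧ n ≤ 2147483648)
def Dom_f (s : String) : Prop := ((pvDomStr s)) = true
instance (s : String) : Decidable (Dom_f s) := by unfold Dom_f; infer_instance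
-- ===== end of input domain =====

-- B replaces A's recursive backtracking grid walk by a char→position index built once
-- plus one linear pass checking adjacency and no-revisit (objective: simpler).
-- Both A and B raise IndexError on the empty string (at s[0]); Pre_f excludes exactly that input.

-- ===== PORT A =====
def matA : List (List Char) :=
  [['0','1','C','H','A'],
   ['9','E','7','B','I'],
   ['K','D','4','8','J'],
   ['6','5','F','G','O'],
   ['L','N','M','2','3']]

def dxyA : List (Int × Int) := [(0,1),(1,0),(0,-1),(-1,0)]

-- matrix[x][y]; in A every access is guarded by 0 <= x < 5 and 0 <= y < 5 (or by
-- range(5) loop indices), so the defaults are never read (exact under the guard).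
def mgetA (x y : Int) : Char :=
  ((PySem.List.pyGet? matA x).getD [] |> (fun r => PySem.List.pyGet? r y)).getD ' '

-- A's inner dfs; `vis` is the 5x5 visited array as a function of the coordinates, the
-- assignment vis[x][y] = True becomes a pointwise functional update (backtracking
-- restores vis, so continuing the for-loop with the old vis is exact); recursion on
-- rem = len(s) - k (the `if k == len(s): return True` branch is rem = 0).
def dfsA (l : List Char) : Nat → Int → Int → (Int → Int → Bool) → Nat → Bool
  | _, _, _, _, 0 => true
  | k, i, j, vis, rem + 1 =>
    dxyA.foldl (fun found d =>
      if found then true else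
      let x := i + d.1
      let y := j + d.2
      if 0 ≤ x ∧ x < 5 ∧ 0 ≤ y ∧ y < 5 ∧ vis x y = false ∧ mgetA x y = l.getD k ' '
      then dfsA l (k + 1) x y (fun a b => if a = x ∧ b = y then true else vis a b) rem
      else false) false

def f (s : String) : Int :=
  let l := s.toList
  let c0 := l.getD 0 ' '   -- s[0]; Pre_f rules out the empty string (IndexError)
  if (List.range 5).any (fun i => (List.range 5).any (fun j =>
       if mgetA i j = c0 then
         dfsA l 1 (i : Int) (j : Int)
           (fun a b => if a = (i : Int) ∧ b = (j : Int) then true else false)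
           (l.length - 1)
       else false))
  then 1 else 0

-- ===== PORT B =====
-- pos = {c: (i, j) for i, row in enumerate(matrix) for j, c in enumerate(row)}
def posB : PySem.Dict Char (Int × Int) :=
  (PySem.List.enumerate matA).foldl (fun d p =>
    (PySem.List.enumerate p.2).foldl (fun d q => d.insert q.2 (p.1, q.1)) d)
    PySem.Dict.empty

-- the loop `for k in range(1, len(s))`, consuming the remaining characters;
-- p is pos[s[k-1]], seen is the visited-char set.
def goB : List Char → (Int × Int) → PySem.Set Char → Int
  | [], _, _ => 1
  | c :: rest, p, seen =>
    match posB.get? c with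
    | none => 0
    | some q =>
      if seen.contains c then 0
      else if (p.1 - q.1).natAbs + (p.2 - q.2).natAbs ≠ 1 then 0
      else goB rest q (seen.add c)

def f_alt (s : String) : Int :=
  let l := s.toList
  let c0 := l.getD 0 ' '   -- s[0]; Pre_f rules out the empty string (IndexError)
  match posB.get? c0 with
  | none => 0
  | some q => goB l.tail q (PySem.Set.ofList [c0])

-- ===== PRECONDITION & SPEC =====
-- A (and B) raise IndexError on "" at s[0]; Pre_f excludes exactly the empty string.
def Pre_f (s : String) : Prop := s ≠ ""
instance (s : String) : Decidable (Pre_f s) := by unfold Pre_f; infer_instance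

def pvWitness_f : String := "EDF"

def Spec_f (s : String) (out : Int) : Prop := out = f_alt s
instance (s : String) (out : Int) : Decidable (Spec_f s out) := by unfold Spec_f; infer_instance

-- ===== CLAIM (what is proved, stated in full; the proofs are below) =====
def Claim_equal_f : Prop := ∀ (s : String), Dom_f s → Pre_f s → Spec_f s (f s)

-- ===== LEMMAS AND PROOFS =====

set_option maxHeartbeats 4000000 in
lemma posB_eq : posB = PySem.Dict.mk [('0',(0,0)),('1',(0,1)),('C',(0,2)),('H',(0,3)),('A',(0,4)),('9',(1,0)),('E',(1,1)),('7',(1,2)),('B',(1,3)),('I',(1,4)),('K',(2,0)),('D',(2,1)),('4',(2,2)),('8',(2,3)),('J',(2,4)),('6',(3,0)),('5',(3,1)),('F',(3,2)),('G',(3,3)),('O',(3,4)),('L',(4,0)),('N',(4,1)),('M',(4,2)),('2',(4,3)),('3',(4,4))] := by decide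

set_option maxHeartbeats 4000000 in
lemma pos_some (c : Char) (x y : Int) :
    posB.get? c = some (x, y) ↔ (0 ≤ x ∧ x < 5 ∧ 0 ≤ y ∧ y < 5 ∧ mgetA x y = c) := by
  constructor
  · intro h
    have hmem := PySem.Dict.mem_items_of_get?_eq_some _ h
    rw [posB_eq] at hmem
    simp only [List.mem_cons, List.not_mem_nil, or_false, Prod.ext_iff] at hmem
    rcases hmem with h|h|h|h|h|h|h|h|h|h|h|h|h|h|h|h|h|h|h|h|h|h|h|h|h <;>
      (obtain ⟨rfl, rfl, rfl⟩ := h; decide)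
  · rintro ⟨hx0, hx5, hy0, hy5, hm⟩
    rw [posB_eq]
    interval_cases x <;> interval_cases y <;> subst hm <;> decide

lemma pos_none (c : Char) :
    posB.get? c = none ↔ ∀ x y : Int, 0 ≤ x → x < 5 → 0 ≤ y → y < 5 → mgetA x y ≠ c := by
  constructor
  · intro h x y hx0 hx5 hy0 hy5 hm
    have h2 := (pos_some c x y).mpr ⟨hx0, hx5, hy0, hy5, hm⟩
    rw [h] at h2; cases h2
  · intro h
    cases hq : posB.get? c with
    | none => rfl
    | some q =>
      obtain ⟨x, y⟩ := q
      have h2 := (pos_some c x y).mp hq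
      exact absurd h2.2.2.2.2 (h x y h2.1 h2.2.1 h2.2.2.1 h2.2.2.2.1)

lemma foldl_orif {α : Type} (F : α → Bool) (L : List α) (b : Bool) :
    L.foldl (fun found d => if found then true else F d) b = (b || L.any F) := by
  induction L generalizing b with
  | nil => simp
  | cons d L ih =>
    simp only [List.foldl_cons, List.any_cons, ih]
    cases b <;> simp

def InvP (vis : Int → Int → Bool) (seen : PySem.Set Char) : Prop :=
  ∀ x y : Int, 0 ≤ x → x < 5 → 0 ≤ y → y < 5 → (vis x y = true ↔ seen.contains (mgetA x y) = true)

lemma guard_iff {vis : Int → Int → Bool} {seen : PySem.Set Char} (hinv : InvP vis seen)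
    (c : Char) (x y : Int) :
    (0 ≤ x ∧ x < 5 ∧ 0 ≤ y ∧ y < 5 ∧ vis x y = false ∧ mgetA x y = c) ↔
      (posB.get? c = some (x, y) ∧ seen.contains c = false) := by
  constructor
  · rintro ⟨hx0, hx5, hy0, hy5, hvis, hm⟩
    refine ⟨(pos_some c x y).mpr ⟨hx0, hx5, hy0, hy5, hm⟩, ?_⟩
    have h := hinv x y hx0 hx5 hy0 hy5
    rw [hm] at h
    cases hc : seen.contains c with
    | false => rfl
    | true => rw [h.mpr hc] at hvis; cases hvis
  · rintro ⟨hq, hc⟩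
    obtain ⟨hx0, hx5, hy0, hy5, hm⟩ := (pos_some c x y).mp hq
    refine ⟨hx0, hx5, hy0, hy5, ?_, hm⟩
    have h := hinv x y hx0 hx5 hy0 hy5
    rw [hm] at h
    cases hv : vis x y with
    | false => rfl
    | true => rw [h.mp hv] at hc; cases hc

lemma inv_step {vis : Int → Int → Bool} {seen : PySem.Set Char} (hinv : InvP vis seen)
    {c : Char} {qx qy : Int} (hq : posB.get? c = some (qx, qy)) :
    InvP (fun a b => if a = qx ∧ b = qy then true else vis a b) (seen.add c) := by
  intro x y hx0 hx5 hy0 hy5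
  have hcontains : (seen.add c).contains (mgetA x y) = true ↔ mgetA x y ∈ seen ∨ mgetA x y = c := by
    rw [PySem.Set.contains_iff, PySem.Set.mem_add]
  have hmc := ((pos_some c qx qy).mp hq).2.2.2.2
  show (if x = qx ∧ y = qy then true else vis x y) = true ↔ _
  by_cases hxy : x = qx ∧ y = qy
  · obtain ⟨rfl, rfl⟩ := hxy
    rw [if_pos ⟨rfl, rfl⟩, hcontains]
    simp only [true_iff]
    exact Or.inr hmc
  · rw [if_neg hxy, hcontains]
    have hne : mgetA x y ≠ c := by
      intro hmm
      have h2 := (pos_some c x y).mpr ⟨hx0, hx5, hy0, hy5, hmm⟩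
      rw [hq] at h2
      simp only [Option.some.injEq, Prod.mk.injEq] at h2
      exact hxy ⟨h2.1.symm, h2.2.symm⟩
    rw [hinv x y hx0 hx5 hy0 hy5, PySem.Set.contains_iff]
    constructor
    · exact Or.inl
    · rintro (h | h)
      · exact h
      · exact absurd h hne

lemma dfs_eq_go (l : List Char) (rest : List Char) :
    ∀ (k : Nat) (i j : Int) (vis : Int → Int → Bool) (seen : PySem.Set Char),
    l.drop k = rest → InvP vis seen →
    (dfsA l k i j vis rest.length = true ↔ goB rest (i, j) seen = 1) := by
  induction rest generalizing l with
  | nil => intro k i j vis seen _ _; simp [dfsA, goB]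
  | cons c rest ih =>
    intro k i j vis seen hdrop hinv
    have hck : l.getD k ' ' = c := by
      have h0 : l[k + 0]? = (l.drop k)[0]? := List.getElem?_drop.symm
      rw [hdrop] at h0
      simp at h0
      simp [List.getD, h0]
    have hdrop' : l.drop (k + 1) = rest := by
      have h1 : l.drop (k + 1) = (l.drop k).drop 1 := by rw [List.drop_drop]
      rw [h1, hdrop]
      rfl
    show (dfsA l k i j vis (rest.length + 1) = true ↔ _)
    rw [dfsA, foldl_orif, Bool.false_or]
    simp only [dxyA, List.any_cons, List.any_nil, Bool.or_false, hck, add_zero]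
    cases hq : posB.get? c with
    | none =>
      have hg : ∀ x y : Int,
          ¬(0 ≤ x ∧ x < 5 ∧ 0 ≤ y ∧ y < 5 ∧ vis x y = false ∧ mgetA x y = c) := by
        intro x y h
        have h2 := ((guard_iff hinv c x y).mp h).1
        rw [hq] at h2
        cases h2
      rw [if_neg (hg _ _), if_neg (hg _ _), if_neg (hg _ _), if_neg (hg _ _)]
      simp [goB, hq]
    | some q =>
      obtain ⟨qx, qy⟩ := q
      have hgd : ∀ x y : Int,
          (0 ≤ x ∧ x < 5 ∧ 0 ≤ y ∧ y < 5 ∧ vis x y = false ∧ mgetA x y = c) ↔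
            ((x = qx ∧ y = qy) ∧ seen.contains c = false) := by
        intro x y
        rw [guard_iff hinv c x y, hq]
        simp only [Option.some.injEq, Prod.mk.injEq]
        constructor
        · rintro ⟨⟨h1, h2⟩, h3⟩
          exact ⟨⟨h1.symm, h2.symm⟩, h3⟩
        · rintro ⟨⟨rfl, rfl⟩, h3⟩
          exact ⟨⟨rfl, rfl⟩, h3⟩
      cases hseen : seen.contains c with
      | true =>
        have hg : ∀ x y : Int,
            ¬(0 ≤ x ∧ x < 5 ∧ 0 ≤ y ∧ y < 5 ∧ vis x y = false ∧ mgetA x y = c) := by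
          intro x y h
          rw [((hgd x y).mp h).2] at hseen
          cases hseen
        have hmem : c ∈ seen := by rw [← PySem.Set.contains_iff]; exact hseen
        rw [if_neg (hg _ _), if_neg (hg _ _), if_neg (hg _ _), if_neg (hg _ _)]
        simp [goB, hq, hmem]
      | false =>
        have hnmem : c ∉ seen := by
          rw [← PySem.Set.contains_iff, hseen]; exact Bool.false_ne_true
        by_cases hdist : (i - qx).natAbs + (j - qy).natAbs = 1
        · have hib := inv_step hinv hq
          have h4 : (qx = i ∧ qy = j + 1) ∨ (qx = i + 1 ∧ qy = j) ∨
              (qx = i ∧ qy = j + -1) ∨ (qx = i + -1 ∧ qy = j) := by omega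
          have hgoB : goB (c :: rest) (i, j) seen = goB rest (qx, qy) (seen.add c) := by
            simp [goB, hq, hnmem, hdist]
          rw [hgoB]
          rcases h4 with ⟨rfl, rfl⟩ | ⟨rfl, rfl⟩ | ⟨rfl, rfl⟩ | ⟨rfl, rfl⟩
          · rw [if_pos ((hgd _ _).mpr ⟨⟨rfl, rfl⟩, hseen⟩),
              if_neg (fun h => by have := ((hgd _ _).mp h).1; omega),
              if_neg (fun h => by have := ((hgd _ _).mp h).1; omega),
              if_neg (fun h => by have := ((hgd _ _).mp h).1; omega)]
            simp only [Bool.or_false]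
            exact ih l (k + 1) _ _ _ _ hdrop' hib
          · rw [if_neg (fun h => by have := ((hgd _ _).mp h).1; omega),
              if_pos ((hgd _ _).mpr ⟨⟨rfl, rfl⟩, hseen⟩),
              if_neg (fun h => by have := ((hgd _ _).mp h).1; omega),
              if_neg (fun h => by have := ((hgd _ _).mp h).1; omega)]
            simp only [Bool.false_or, Bool.or_false]
            exact ih l (k + 1) _ _ _ _ hdrop' hib
          · rw [if_neg (fun h => by have := ((hgd _ _).mp h).1; omega),
              if_neg (fun h => by have := ((hgd _ _).mp h).1; omega),
              if_pos ((hgd _ _).mpr ⟨⟨rfl, rfl⟩, hseen⟩),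
              if_neg (fun h => by have := ((hgd _ _).mp h).1; omega)]
            simp only [Bool.false_or, Bool.or_false]
            exact ih l (k + 1) _ _ _ _ hdrop' hib
          · rw [if_neg (fun h => by have := ((hgd _ _).mp h).1; omega),
              if_neg (fun h => by have := ((hgd _ _).mp h).1; omega),
              if_neg (fun h => by have := ((hgd _ _).mp h).1; omega),
              if_pos ((hgd _ _).mpr ⟨⟨rfl, rfl⟩, hseen⟩)]
            simp only [Bool.false_or]
            exact ih l (k + 1) _ _ _ _ hdrop' hib
        · have hg : ∀ x y : Int, (x - i).natAbs + (y - j).natAbs = 1 →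
              ¬(0 ≤ x ∧ x < 5 ∧ 0 ≤ y ∧ y < 5 ∧ vis x y = false ∧ mgetA x y = c) := by
            intro x y hd h
            have h2 := ((hgd x y).mp h).1
            omega
          rw [if_neg (hg _ _ (by omega)), if_neg (hg _ _ (by omega)),
            if_neg (hg _ _ (by omega)), if_neg (hg _ _ (by omega))]
          simp [goB, hq, hnmem, hdist]

lemma goB_01 (rest : List Char) : ∀ (p : Int × Int) (seen : PySem.Set Char),
    goB rest p seen = 0 ∨ goB rest p seen = 1 := by
  induction rest with
  | nil => intro p seen; right; rfl
  | cons c rest ih =>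
    intro p seen
    cases hqc : posB.get? c with
    | none => left; simp [goB, hqc]
    | some q =>
      by_cases h1 : c ∈ seen <;>
        by_cases h2 : (p.1 - q.1).natAbs + (p.2 - q.2).natAbs ≠ 1 <;>
        simp [goB, hqc, h1, h2, ih]

lemma f_eq (s : String) : f s = f_alt s := by
  unfold f f_alt
  cases hq : posB.get? (s.toList.getD 0 ' ') with
  | none =>
    have hnot : ¬ ((List.range 5).any (fun i => (List.range 5).any (fun j =>
        if mgetA i j = s.toList.getD 0 ' ' then
          dfsA s.toList 1 (i : Int) (j : Int)
            (fun a b => if a = (i : Int) ∧ b = (j : Int) then true else false)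
            (s.toList.length - 1)
        else false)) = true) := by
      intro hany
      simp only [List.any_eq_true, List.mem_range] at hany
      obtain ⟨i, hi, j, hj, hij⟩ := hany
      by_cases hm : mgetA i j = s.toList.getD 0 ' '
      · exact (pos_none _).mp hq i j (by positivity) (by exact_mod_cast hi) (by positivity)
          (by exact_mod_cast hj) hm
      · rw [if_neg hm] at hij; cases hij
    simp only [hq, if_neg hnot]
  | some q =>
    obtain ⟨qx, qy⟩ := q
    obtain ⟨hx0, hx5, hy0, hy5, hm⟩ := (pos_some _ qx qy).mp hq
    have hinv0 : InvP (fun a b => if a = qx ∧ b = qy then true else false)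
        (PySem.Set.ofList [s.toList.getD 0 ' ']) := by
      intro x y hx0' hx5' hy0' hy5'
      show (if x = qx ∧ y = qy then true else false) = true ↔ _
      have hcon : (PySem.Set.ofList [s.toList.getD 0 ' ']).contains (mgetA x y) = true ↔
          mgetA x y = s.toList.getD 0 ' ' := by
        rw [PySem.Set.contains_iff, PySem.Set.mem_ofList]
        simp
      rw [hcon]
      constructor
      · intro h
        by_cases hxy : x = qx ∧ y = qy
        · obtain ⟨rfl, rfl⟩ := hxy; exact hm
        · rw [if_neg hxy] at h; cases h
      · intro h
        have h2 := (pos_some _ x y).mpr ⟨hx0', hx5', hy0', hy5', h⟩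
        rw [hq] at h2
        simp only [Option.some.injEq, Prod.mk.injEq] at h2
        rw [if_pos ⟨h2.1.symm, h2.2.symm⟩]
    have hmain := dfs_eq_go s.toList (s.toList.drop 1) 1 qx qy
      (fun a b => if a = qx ∧ b = qy then true else false)
      (PySem.Set.ofList [s.toList.getD 0 ' ']) rfl hinv0
    rw [List.length_drop] at hmain
    have hlen : s.toList.tail = s.toList.drop 1 := (List.drop_one).symm
    have hany : ((List.range 5).any (fun i => (List.range 5).any (fun j =>
        if mgetA i j = s.toList.getD 0 ' ' then
          dfsA s.toList 1 (i : Int) (j : Int)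
            (fun a b => if a = (i : Int) ∧ b = (j : Int) then true else false)
            (s.toList.length - 1)
        else false)) = true) ↔
        dfsA s.toList 1 qx qy (fun a b => if a = qx ∧ b = qy then true else false)
          (s.toList.length - 1) = true := by
      constructor
      · intro hany
        simp only [List.any_eq_true, List.mem_range] at hany
        obtain ⟨i, hi, j, hj, hij⟩ := hany
        by_cases hm' : mgetA i j = s.toList.getD 0 ' '
        · rw [if_pos hm'] at hij
          have h2 := (pos_some _ (i : Int) (j : Int)).mpr
            ⟨by positivity, by exact_mod_cast hi, by positivity, by exact_mod_cast hj, hm'⟩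
          rw [hq] at h2
          simp only [Option.some.injEq, Prod.mk.injEq] at h2
          rw [← h2.1, ← h2.2] at hij
          exact hij
        · rw [if_neg hm'] at hij; cases hij
      · intro hdfs
        simp only [List.any_eq_true, List.mem_range]
        refine ⟨qx.toNat, by omega, qy.toNat, by omega, ?_⟩
        have hqx : ((qx.toNat : Int)) = qx := Int.toNat_of_nonneg hx0
        have hqy : ((qy.toNat : Int)) = qy := Int.toNat_of_nonneg hy0
        rw [hqx, hqy, if_pos hm]
        exact hdfs
    simp only [hq]
    rw [hlen]
    rcases goB_01 (s.toList.drop 1) (qx, qy) (PySem.Set.ofList [s.toList.getD 0 ' ']) with hgo | hgo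
    · rw [hgo, if_neg]
      intro h
      have h2 := hmain.mp (hany.mp h)
      rw [hgo] at h2
      cases h2
    · rw [hgo, if_pos]
      exact hany.mpr (hmain.mpr hgo)

-- ===== VERDICT (by name: the statement is the Claim_ definition above) =====
theorem f_spec : Claim_equal_f := fun s _ _ => f_eq s
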